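-- pv_equiv track=rewrite | github.com/hopejiu/dota2_local_modify | unpack.py | preprocess_vdf_content
-- ===== SOURCE A (Python) =====
-- def preprocess_vdf_content(content: str) -> str:
--     """预处理 VDF 文本内容，修复 vdf 库无法解析的问题
--
--     处理内容：
--     1. 同行双闭合括号（如 "}\\t\\t}"）拆为两行
--     2. 移除整行注释（含引号的注释会干扰 vdf 解析）
--     3. 移除行内注释（引号外的 // 注释）
--     """
--     # 修复同行双闭合括号
--     content = content.replace("}\t\t}", "}\n\t\t}")
--     lines = content.split("\n")
--     cleaned = []
--     for line in lines:
--         stripped = line.strip()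
--         if stripped.startswith("//"):
--             continue
--         # 移除行内注释
--         in_quote = False
--         result = []
--         i = 0
--         while i < len(line):
--             ch = line[i]
--             if ch == '"':
--                 in_quote = not in_quote
--                 result.append(ch)
--             elif ch == "/" and i + 1 < len(line) and line[i + 1] == "/" and not in_quote:
--                 break
--             else:
--                 result.append(ch)
--             i += 1
--         cleaned.append("".join(result))
--     return "\n".join(cleaned)
-- ===== SOURCE B (Python) =====
-- def preprocess_vdf_content(content: str) -> str:
--     """Same cleanup, but inline comments are removed by splitting each line on
--     '"' (even segments are outside quotes) instead of a per-char state machine."""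
--     content = content.replace("}\t\t}", "}\n\t\t}")
--     cleaned = []
--     for line in content.split("\n"):
--         if line.strip().startswith("//"):
--             continue
--         segs = line.split('"')
--         k = 0
--         while k < len(segs):
--             p = segs[k].find("//")
--             if p != -1:
--                 segs = segs[:k] + [segs[k][:p]]
--                 break
--             k += 2
--         cleaned.append('"'.join(segs))
--     return "\n".join(cleaned)
-- ===== Notes on version B (the rewrite author's own statement) =====
-- stated objective: faster
-- what changed: Inline comments are removed by splitting each line on the double-quote character and scanning only the even (outside-quotes) segments for the comment marker, truncating there and rejoining, instead of A's per-character scan with an in_quote state flag.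
import Mathlib
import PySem

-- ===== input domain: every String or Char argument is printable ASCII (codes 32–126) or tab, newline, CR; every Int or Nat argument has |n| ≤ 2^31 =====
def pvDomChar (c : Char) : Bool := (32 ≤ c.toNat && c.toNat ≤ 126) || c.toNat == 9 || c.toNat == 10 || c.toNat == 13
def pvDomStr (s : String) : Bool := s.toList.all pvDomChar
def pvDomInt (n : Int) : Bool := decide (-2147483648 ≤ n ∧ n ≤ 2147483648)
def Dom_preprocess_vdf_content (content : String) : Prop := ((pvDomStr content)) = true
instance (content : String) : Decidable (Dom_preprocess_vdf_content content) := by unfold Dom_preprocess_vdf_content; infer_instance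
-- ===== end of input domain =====

-- B removes inline comments by splitting each line on '"' (even segments are outside
-- quotes) instead of A's per-character quote-state machine; objective: segment-level passes replace the per-character loop (measured faster in a timing run).

-- ===== PORT A =====
-- A's inner while loop: per-character scan with an in_quote flag, breaking at '//' outside quotes.
def pvALoop : List Char → Bool → List Char
  | [], _ => []
  | c :: rest, q =>
    if c = '"' then c :: pvALoop rest (!q)
    else if c = '/' ∧ rest.head? = some '/' ∧ q = false then []
    else c :: pvALoop rest q

-- A's for-loop over lines: skip whole-line comments, clean the rest.
def pvAClean : List (List Char) → List (List Char)
  | [] => []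
  | l :: rest =>
    if PySem.Chars.startswith (PySem.Chars.strip l) ['/', '/'] then pvAClean rest
    else pvALoop l false :: pvAClean rest

def preprocess_vdf_content (content : String) : String :=
  String.ofList (PySem.Chars.join ['\n'] (pvAClean (PySem.Chars.splitOn
    (PySem.Chars.replace content.toList ['}','\t','\t','}'] ['}','\n','\t','\t','}']) ['\n'])))

-- ===== PORT B =====
-- B's while loop over the quote-split segments, stepping by two (each step sees the even
-- segment and its odd partner): truncate at the first '//' found in an even segment and
-- discard everything after it.
def pvBGo : List (List Char) → List (List Char)
  | [] => []
  | [s] =>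
    let p := PySem.Chars.find s ['/', '/']
    if p ≠ -1 then [PySem.List.slice s none (some p)] else [s]
  | s :: t :: rest' =>
    let p := PySem.Chars.find s ['/', '/']
    if p ≠ -1 then [PySem.List.slice s none (some p)] else s :: t :: pvBGo rest'

def pvBLine (l : List Char) : List Char :=
  PySem.Chars.join ['"'] (pvBGo (PySem.Chars.splitOn l ['"']))

def pvBClean : List (List Char) → List (List Char)
  | [] => []
  | l :: rest =>
    if PySem.Chars.startswith (PySem.Chars.strip l) ['/', '/'] then pvBClean rest
    else pvBLine l :: pvBClean rest

def preprocess_vdf_content_alt (content : String) : String :=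
  String.ofList (PySem.Chars.join ['\n'] (pvBClean (PySem.Chars.splitOn
    (PySem.Chars.replace content.toList ['}','\t','\t','}'] ['}','\n','\t','\t','}']) ['\n'])))

-- ===== PRECONDITION & SPEC =====
def Spec_preprocess_vdf_content (content : String) (out : String) : Prop := out = preprocess_vdf_content_alt content
instance (content : String) (out : String) : Decidable (Spec_preprocess_vdf_content content out) := by unfold Spec_preprocess_vdf_content; infer_instance

-- ===== CLAIM (what is proved, stated in full; the proofs are below) =====
def Claim_equal_preprocess_vdf_content : Prop := ∀ (content : String), Dom_preprocess_vdf_content content → Spec_preprocess_vdf_content content (preprocess_vdf_content content)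

-- ===== LEMMAS AND PROOFS =====

-- structural reformulation of PySem.Chars.splitOn for a one-character separator
def pvSplit (c : Char) : List Char → List (List Char)
  | [] => [[]]
  | d :: rest =>
    if d = c then [] :: pvSplit c rest
    else
      match pvSplit c rest with
      | [] => [[d]]
      | x :: xs => (d :: x) :: xs

theorem pvSplit_ne_nil (c : Char) (cs : List Char) : pvSplit c cs ≠ [] := by
  cases cs with
  | nil => simp [pvSplit]
  | cons d rest =>
    simp only [pvSplit]
    split
    · simp
    · split <;> simp

theorem pvSplitOn_go_spec (c : Char) (fuel : Nat) :
    ∀ (cs cur : List Char) (acc : List (List Char)), cs.length < fuel →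
      PySem.Chars.splitOn.go [c] fuel cs cur acc =
        acc.reverse ++ (match pvSplit c cs with
          | [] => []
          | x :: xs => (cur.reverse ++ x) :: xs) := by
  induction fuel with
  | zero => intro cs cur acc h; omega
  | succ fuel ih =>
    intro cs cur acc h
    cases cs with
    | nil => simp [PySem.Chars.splitOn.go, pvSplit]
    | cons d rest =>
      by_cases hd : d = c
      · have hpre : [c].isPrefixOf (d :: rest) = true := by simp [List.isPrefixOf, hd]
        rw [PySem.Chars.splitOn.go, if_pos hpre]
        simp only [List.length_cons] at h
        have := ih rest [] (cur.reverse :: acc) (by omega)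
        rw [show (List.drop [c].length (d :: rest)) = rest by simp]
        rw [this]
        cases hms : pvSplit c rest with
        | nil => exact absurd hms (pvSplit_ne_nil c rest)
        | cons x xs => simp [pvSplit, hd, hms]
      · have hpre : [c].isPrefixOf (d :: rest) = false := by
          simp [List.isPrefixOf]; exact fun h' => absurd h'.symm hd
        rw [PySem.Chars.splitOn.go, if_neg (by simp [hpre])]
        simp only [List.length_cons] at h
        rw [ih rest (d :: cur) acc (by omega)]
        cases hms : pvSplit c rest with
        | nil => exact absurd hms (pvSplit_ne_nil c rest)
        | cons x xs => simp [pvSplit, hd, hms]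

theorem pvSplitOn_eq (c : Char) (cs : List Char) :
    PySem.Chars.splitOn cs [c] = pvSplit c cs := by
  rw [PySem.Chars.splitOn, pvSplitOn_go_spec c (cs.length + 1) cs [] [] (by omega)]
  cases hms : pvSplit c cs with
  | nil => exact absurd hms (pvSplit_ne_nil c cs)
  | cons x xs => simp

-- shifting the start index of find.go
theorem pvFind_go_shift (sub : List Char) (s : List Char) :
    ∀ k : Nat, PySem.Chars.find.go sub s k =
      if PySem.Chars.find.go sub s 0 = -1 then -1 else PySem.Chars.find.go sub s 0 + k := by
  induction s with
  | nil =>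
    intro k
    simp only [PySem.Chars.find.go]
    split <;> simp
  | cons h t ih =>
    intro k
    rw [PySem.Chars.find.go]
    conv_rhs => rw [PySem.Chars.find.go]
    split
    · simp
    · rw [ih (k + 1), ih 1]
      have hge : -1 ≤ PySem.Chars.find.go sub t 0 := by
        have := PySem.Chars.neg_one_le_find t sub
        rwa [PySem.Chars.find] at this
      split_ifs with h1 h2 h3 <;> omega

theorem pvFind_cons (sub : List Char) (c : Char) (x : List Char)
    (h : ¬ sub.isPrefixOf (c :: x) = true) :
    PySem.Chars.find (c :: x) sub =
      if PySem.Chars.find x sub = -1 then -1 else PySem.Chars.find x sub + 1 := by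
  rw [PySem.Chars.find, PySem.Chars.find.go, if_neg h, pvFind_go_shift, PySem.Chars.find]
  norm_num

theorem pvJoin_pair (a b : List Char) (l : List (List Char)) :
    PySem.Chars.join ['"'] (a :: b :: l) = a ++ '"' :: PySem.Chars.join ['"'] (b :: l) := by
  simp only [PySem.Chars.join]
  induction l generalizing a b <;> simp_all [List.intercalate, List.intersperse]

-- truncation of a segment with a '//', pushed under one cons
theorem pvSlice_find_cons (c : Char) (x : List Char)
    (hx : PySem.Chars.find x ['/', '/'] ≠ -1) :
    PySem.List.slice (c :: x) none (some (PySem.Chars.find x ['/', '/'] + 1)) =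
      c :: PySem.List.slice x none (some (PySem.Chars.find x ['/', '/'])) := by
  have hge : -1 ≤ PySem.Chars.find x ['/', '/'] := PySem.Chars.neg_one_le_find x _
  rw [PySem.List.slice_to _ (by omega), PySem.List.slice_to _ (by omega)]
  rw [show (PySem.Chars.find x ['/', '/'] + 1).toNat = (PySem.Chars.find x ['/', '/']).toNat + 1 by omega]
  simp [List.take_succ_cons]

-- prepending a non-'//'-starting char to the first (even) segment commutes with pvBGo + join
theorem pvBGo_cons (c : Char) (x : List Char) (xs : List (List Char))
    (h : ¬ ['/', '/'].isPrefixOf (c :: x) = true) :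
    PySem.Chars.join ['"'] (pvBGo ((c :: x) :: xs)) =
      c :: PySem.Chars.join ['"'] (pvBGo (x :: xs)) := by
  have hfind := pvFind_cons ['/', '/'] c x h
  by_cases hx : PySem.Chars.find x ['/', '/'] = -1
  · rw [if_pos hx] at hfind
    cases xs with
    | nil => simp [pvBGo, hfind, hx]
    | cons t rest' =>
      simp only [pvBGo, hfind, hx, ne_eq, not_true_eq_false, if_false]
      rw [pvJoin_pair, pvJoin_pair]
      simp
  · rw [if_neg hx] at hfind
    have hne : PySem.Chars.find (c :: x) ['/', '/'] ≠ -1 := by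
      have hge : -1 ≤ PySem.Chars.find x ['/', '/'] := PySem.Chars.neg_one_le_find x _
      rw [hfind]; omega
    cases xs with
    | nil =>
      simp only [pvBGo, hne, hx, ne_eq, not_false_eq_true, if_true]
      rw [hfind, pvSlice_find_cons c x hx]
      simp
    | cons t rest' =>
      simp only [pvBGo, hne, hx, ne_eq, not_false_eq_true, if_true]
      rw [hfind, pvSlice_find_cons c x hx]
      simp

-- the head of the first segment of pvSplit '"' rest is '/' iff rest starts with '/'
theorem pvBGo_ne_nil (s : List Char) (rest : List (List Char)) : pvBGo (s :: rest) ≠ [] := by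
  cases rest with
  | nil => simp only [pvBGo]; split <;> simp
  | cons t r => simp only [pvBGo]; split <;> simp

theorem pvJoin_cons_ne_nil (x : List Char) {l : List (List Char)} (h : l ≠ []) :
    PySem.Chars.join ['"'] (x :: l) = x ++ '"' :: PySem.Chars.join ['"'] l := by
  cases l with
  | nil => exact absurd rfl h
  | cons b t => exact pvJoin_pair x b t

theorem pvSplit_head (rest : List Char) :
    ((pvSplit '"' rest).headI.head? = some '/') ↔ (rest.head? = some '/') := by
  cases rest with
  | nil => simp [pvSplit]
  | cons d r =>
    by_cases hd : d = '"'
    · subst hd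
      simp [pvSplit]
    · simp only [pvSplit, if_neg hd]
      cases hms : pvSplit '"' r with
      | nil => exact absurd hms (pvSplit_ne_nil '"' r)
      | cons y ys => simp

-- isPrefixOf ['/','/'] in terms of A's break condition
theorem pvPrefix_iff (c : Char) (x : List Char) :
    ['/', '/'].isPrefixOf (c :: x) = true ↔ (c = '/' ∧ x.head? = some '/') := by
  cases x with
  | nil => simp [List.isPrefixOf]
  | cons y ys =>
    simp [List.isPrefixOf]
    aesop

-- main invariant: A's char loop equals B's segment pass, in both quote states
theorem pvMain (cs : List Char) :
    pvALoop cs false = PySem.Chars.join ['"'] (pvBGo (pvSplit '"' cs)) ∧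
    pvALoop cs true = (match pvSplit '"' cs with
      | [] => []
      | [x] => x
      | x :: xs => x ++ '"' :: PySem.Chars.join ['"'] (pvBGo xs)) := by
  induction cs with
  | nil =>
    constructor
    · simp [pvALoop, pvSplit, pvBGo]
      decide
    · simp [pvALoop, pvSplit]
  | cons c rest ih =>
    obtain ⟨ihP, ihQ⟩ := ih
    by_cases hq : c = '"'
    · subst hq
      cases hms : pvSplit '"' rest with
      | nil => exact absurd hms (pvSplit_ne_nil '"' rest)
      | cons x xs =>
        have hsplit : pvSplit '"' ('"' :: rest) = [] :: x :: xs := by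
          simp [pvSplit, hms]
        have hfe : PySem.Chars.find ([] : List Char) ['/', '/'] = -1 := by decide
        constructor
        · -- state false: emit '"', continue in state true
          have hstep : pvALoop ('"' :: rest) false = '"' :: pvALoop rest true := rfl
          rw [hstep, ihQ, hms, hsplit]
          cases xs with
          | nil =>
            simp only [pvBGo, hfe]
            simp [pvJoin_pair]
          | cons t r =>
            simp only [pvBGo, hfe]
            simp only [ne_eq, not_true_eq_false, if_false]
            rw [pvJoin_pair, pvJoin_cons_ne_nil x (pvBGo_ne_nil t r)]
            simp
        · -- state true: emit '"', continue in state false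
          have hstep : pvALoop ('"' :: rest) true = '"' :: pvALoop rest false := rfl
          rw [hstep, ihP, hms, hsplit]
          simp
    · cases hms : pvSplit '"' rest with
      | nil => exact absurd hms (pvSplit_ne_nil '"' rest)
      | cons x xs =>
        have hsplit : pvSplit '"' (c :: rest) = (c :: x) :: xs := by
          simp [pvSplit, hq, hms]
        by_cases hbr : c = '/' ∧ rest.head? = some '/'
        · constructor
          · have hstep : pvALoop (c :: rest) false = [] := by
              rw [pvALoop, if_neg hq, if_pos ⟨hbr.1, hbr.2, rfl⟩]
            rw [hstep, hsplit]
            have hpre : ['/', '/'].isPrefixOf (c :: x) = true := by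
              rw [pvPrefix_iff]
              exact ⟨hbr.1, by have := pvSplit_head rest; rw [hms] at this; exact this.mpr hbr.2⟩
            have hf : PySem.Chars.find (c :: x) ['/', '/'] = 0 := by
              rw [PySem.Chars.find, PySem.Chars.find.go, if_pos hpre]; norm_num
            cases xs with
            | nil =>
              simp only [pvBGo, hf]
              norm_num
              rw [PySem.List.slice_to _ (le_refl 0)]
              simp
            | cons t r =>
              simp only [pvBGo, hf]
              norm_num
              rw [PySem.List.slice_to _ (le_refl 0)]
              simp
          · have hstep : pvALoop (c :: rest) true = c :: pvALoop rest true := by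
              rw [pvALoop, if_neg hq, if_neg (by simp)]
            rw [hstep, ihQ, hms, hsplit]
            cases xs <;> simp
        · have hpre : ¬ ['/', '/'].isPrefixOf (c :: x) = true := by
            rw [pvPrefix_iff]
            intro ⟨h1, h2⟩
            exact hbr ⟨h1, by have := pvSplit_head rest; rw [hms] at this; exact this.mp h2⟩
          constructor
          · have hstep : pvALoop (c :: rest) false = c :: pvALoop rest false := by
              rw [pvALoop, if_neg hq, if_neg (by rintro ⟨h1, h2, -⟩; exact hbr ⟨h1, h2⟩)]
            rw [hstep, ihP, hsplit, pvBGo_cons c x xs hpre, hms]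
          · have hstep : pvALoop (c :: rest) true = c :: pvALoop rest true := by
              rw [pvALoop, if_neg hq, if_neg (by simp)]
            rw [hstep, ihQ, hms, hsplit]
            cases xs <;> simp
theorem pvLine_eq (l : List Char) : pvALoop l false = pvBLine l := by
  rw [pvBLine, pvSplitOn_eq]
  exact (pvMain l).1

theorem pvClean_eq (ls : List (List Char)) : pvAClean ls = pvBClean ls := by
  induction ls with
  | nil => rfl
  | cons l rest ih =>
    simp only [pvAClean, pvBClean, ih, pvLine_eq]

-- ===== VERDICT (by name: the statement is the Claim_ definition above) =====
theorem preprocess_vdf_content_spec : Claim_equal_preprocess_vdf_content := by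
  intro content _
  unfold Spec_preprocess_vdf_content preprocess_vdf_content preprocess_vdf_content_alt
  rw [pvClean_eq]
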